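-- pv_equiv track=rewrite | github.com/Sameer281187/DSA | Patterns/HollowSquare.py | generate_hollow_string
-- ===== SOURCE A (Python) =====
-- def generate_hollow_string(n):
--     str = ""
--     for i in range(n):
--         if i == 0 or i == n-1:
--             str += '*'
--         else:
--             str += ' '
--     return str
-- ===== SOURCE B (Python) =====
-- def generate_hollow_string(n):
--     if n <= 0:
--         return ""
--     if n == 1:
--         return "*"
--     return "*" + " " * (n - 2) + "*"
-- ===== Notes on version B (the rewrite author's own statement) =====
-- stated objective: simpler
-- what changed: Replaced the per-index loop with branch guards plus a closed-form concatenation '*' + ' '*(n-2) + '*'.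
import Mathlib
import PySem

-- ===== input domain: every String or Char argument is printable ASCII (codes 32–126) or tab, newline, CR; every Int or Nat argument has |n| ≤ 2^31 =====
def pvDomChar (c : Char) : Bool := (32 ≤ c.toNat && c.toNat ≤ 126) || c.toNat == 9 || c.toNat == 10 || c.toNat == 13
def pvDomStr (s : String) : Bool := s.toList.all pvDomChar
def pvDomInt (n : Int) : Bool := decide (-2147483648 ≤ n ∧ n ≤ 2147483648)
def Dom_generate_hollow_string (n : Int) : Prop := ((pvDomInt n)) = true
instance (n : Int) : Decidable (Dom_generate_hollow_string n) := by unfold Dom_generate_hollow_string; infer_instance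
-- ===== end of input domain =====

-- B replaces the per-index loop with guards and a closed-form '*' ++ spaces ++ '*' (simpler).

-- ===== PORT A =====
-- str accumulated character by character over range(n); String is built via List Char (PySem convention).
def generate_hollow_string (n : Int) : String :=
  String.ofList ((PySem.List.pyRange 0 n 1).foldl
    (fun acc i => acc ++ (if i = 0 ∨ i = n - 1 then ['*'] else [' '])) [])

-- ===== PORT B =====
def generate_hollow_string_alt (n : Int) : String :=
  if n ≤ 0 then ""
  else if n = 1 then "*"
  else String.ofList (['*'] ++ List.replicate (n - 2).toNat ' ' ++ ['*'])

-- ===== PRECONDITION & SPEC =====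
def Spec_generate_hollow_string (n : Int) (out : String) : Prop := out = generate_hollow_string_alt n
instance (n : Int) (out : String) : Decidable (Spec_generate_hollow_string n out) := by unfold Spec_generate_hollow_string; infer_instance

-- ===== CLAIM (what is proved, stated in full; the proofs are below) =====
def Claim_equal_generate_hollow_string : Prop := ∀ (n : Int), Dom_generate_hollow_string n → Spec_generate_hollow_string n (generate_hollow_string n)

-- ===== LEMMAS AND PROOFS =====

theorem flatMap_const_singleton {α : Type} (l : List α) (c : Char) :
    l.flatMap (fun _ => [c]) = List.replicate l.length c := by
  induction l with
  | nil => rfl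
  | cons x xs ih => simp [List.replicate_succ, ih]

-- A's loop body appends one char per index: flatMap form, then a map over the range.
theorem hollow_chars (n : Int) (h2 : 2 ≤ n) :
    (PySem.List.pyRange 0 n 1).flatMap
      (fun i => if i = 0 ∨ i = n - 1 then ['*'] else [' '])
    = ['*'] ++ List.replicate (n - 2).toNat ' ' ++ ['*'] := by
  rw [PySem.List.pyRange_one_append 0 1 n (by omega) (by omega),
      PySem.List.pyRange_one_append 1 (n-1) n (by omega) (by omega)]
  have h1 : PySem.List.pyRange 0 1 1 = [0] := PySem.List.pyRange_one_singleton 0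
  have h3 : PySem.List.pyRange (n-1) n 1 = [n-1] := by
    have := PySem.List.pyRange_one_singleton (n-1)
    simpa [show n - 1 + 1 = n by omega] using this
  simp only [h1, h3, List.flatMap_append, List.flatMap_cons, List.flatMap_nil]
  have hmid : (PySem.List.pyRange 1 (n-1) 1).flatMap
      (fun i => if i = 0 ∨ i = n - 1 then ['*'] else [' '])
      = List.replicate (n - 2).toNat ' ' := by
    calc (PySem.List.pyRange 1 (n-1) 1).flatMap
          (fun i => if i = 0 ∨ i = n - 1 then ['*'] else [' '])
        = (PySem.List.pyRange 1 (n-1) 1).flatMap (fun _ => [' ']) := by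
          apply List.flatMap_congr
          intro i hi
          rw [PySem.List.mem_pyRange_one] at hi
          simp only [if_neg (by omega : ¬ (i = 0 ∨ i = n - 1))]
      _ = List.replicate (PySem.List.pyRange 1 (n-1) 1).length ' ' := flatMap_const_singleton _ _
      _ = List.replicate (n - 2).toNat ' ' := by
          rw [PySem.List.length_pyRange_one]
          congr 1
          omega
  rw [hmid]
  simp [show ¬ (n - 1 = 0) by omega, show (0:Int) ≠ n - 1 by omega]

theorem generate_hollow_string_eq (n : Int) :
    generate_hollow_string n = generate_hollow_string_alt n := by
  unfold generate_hollow_string generate_hollow_string_alt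
  by_cases h0 : n ≤ 0
  · rw [if_pos h0, PySem.List.pyRange_one_eq_nil (by omega)]
    rfl
  · rw [if_neg h0]
    by_cases h1 : n = 1
    · subst h1
      rw [if_pos rfl,
          show PySem.List.pyRange 0 1 1 = [0] by
            simpa using PySem.List.pyRange_one_singleton 0]
      rfl
    · rw [if_neg h1, PySem.List.foldl_append_eq_flatMap, List.nil_append,
          hollow_chars n (by omega)]

-- ===== VERDICT (by name: the statement is the Claim_ definition above) =====
theorem generate_hollow_string_spec : Claim_equal_generate_hollow_string := by
  intro n _
  exact generate_hollow_string_eq n
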